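-- pv_equiv track=rewrite | github.com/minidomo/anki-type-test | src/card_stats.py | _generate_html_word
-- ===== SOURCE A (Python) =====
-- def _generate_html_word(correct: str, user: str) -> str:
--     def determine_color_class(target: str, value: str):
--         # not typed #7F848E
--         # extra #A2575F
--         # correct #98C379
--         # wrong #E06C75
--
--         if len(target) == 0:
--             return "letter-extra"
--
--         if len(value) == 0:
--             return "letter-missing"
--
--         if target == value:
--             return "letter-correct"
--
--         return "letter-incorrect"
--
--     def create_span(character: str, color_class: str):
--         return f'<span class="{color_class}">{character}</span>'
--
--     ret: list[str] = []
--
--     i = 0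
--     j = 0
--
--     while i < len(correct) and j < len(user):
--         ret.append(
--             create_span(correct[i], determine_color_class(correct[i], user[j]))
--         )
--         i += 1
--         j += 1
--
--     while i < len(correct):
--         ret.append(create_span(correct[i], determine_color_class(correct[i], "")))
--         i += 1
--
--     while j < len(user):
--         ret.append(create_span(user[j], determine_color_class("", user[j])))
--         j += 1
--
--     return "".join(ret)
-- ===== SOURCE B (Python) =====
-- def _generate_html_word(correct: str, user: str) -> str:
--     n = max(len(correct), len(user))
--     if n == 0:
--         return ''
--     if n == 1:
--         if not correct:
--             return f'<span class="letter-extra">{user}</span>'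
--         if not user:
--             return f'<span class="letter-missing">{correct}</span>'
--         cls = 'letter-correct' if correct == user else 'letter-incorrect'
--         return f'<span class="{cls}">{correct}</span>'
--     m = n // 2
--     return (_generate_html_word(correct[:m], user[:m])
--             + _generate_html_word(correct[m:], user[m:]))
-- ===== Notes on version B (the rewrite author's own statement) =====
-- stated objective: alternative
-- what changed: Replaces A's three sequential index-based while loops with a balanced divide-and-conquer: alignment is positional, so the problem splits at any index; B recursively splits both strings at half the longer length down to single aligned positions, which it classifies directly, and concatenates the halves.
import Mathlib
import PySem

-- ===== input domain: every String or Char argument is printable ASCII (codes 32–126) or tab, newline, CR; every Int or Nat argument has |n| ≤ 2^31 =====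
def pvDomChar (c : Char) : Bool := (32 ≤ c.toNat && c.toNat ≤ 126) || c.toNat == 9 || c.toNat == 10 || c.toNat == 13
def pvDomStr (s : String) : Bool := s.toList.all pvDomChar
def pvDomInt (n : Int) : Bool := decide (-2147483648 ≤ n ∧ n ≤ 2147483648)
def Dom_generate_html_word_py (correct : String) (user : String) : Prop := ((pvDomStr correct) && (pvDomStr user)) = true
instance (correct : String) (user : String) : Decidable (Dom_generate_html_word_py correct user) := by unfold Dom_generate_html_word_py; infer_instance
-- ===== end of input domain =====

-- B replaces A's three index-based while loops with a balanced divide-and-conquer on the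
-- aligned positions (split both strings at half the longer length; classify single positions); objective: alternative.

-- ===== PORT A =====
-- Python's f-string span is built on List Char (String.ofList of concatenated char lists): exact for these strings.
def pvDetClass (target : List Char) (value : List Char) : String :=
  if target.length = 0 then "letter-extra"
  else if value.length = 0 then "letter-missing"
  else if target = value then "letter-correct"
  else "letter-incorrect"

def pvCreateSpan (character : Char) (colorClass : String) : String :=
  String.ofList ("<span class=\"".toList ++ colorClass.toList ++ "\">".toList ++ [character] ++ "</span>".toList)

-- first while loop: walk both strings in step, returning the spans and the two remainders correct[i:], user[j:]
def pvALoop1 : List Char → List Char → List String × List Char × List Char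
  | x :: xs, y :: ys =>
      let r := pvALoop1 xs ys
      (pvCreateSpan x (pvDetClass [x] [y]) :: r.1, r.2.1, r.2.2)
  | cs, us => ([], cs, us)

-- second while loop: remaining correct characters
def pvALoop2 : List Char → List String
  | x :: xs => pvCreateSpan x (pvDetClass [x] []) :: pvALoop2 xs
  | [] => []

-- third while loop: remaining user characters
def pvALoop3 : List Char → List String
  | y :: ys => pvCreateSpan y (pvDetClass [] [y]) :: pvALoop3 ys
  | [] => []

def generate_html_word_py (correct : String) (user : String) : String :=
  let r := pvALoop1 correct.toList user.toList
  String.join (r.1 ++ pvALoop2 r.2.1 ++ pvALoop3 r.2.2)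

-- ===== PORT B =====
-- Source B's divide-and-conquer; fuel (≥ the longer length) only makes the recursion structural,
-- the non-negative in-range slices c[:m], c[m:] are List.take/drop
def pvAltGo : Nat → List Char → List Char → String
  | 0, _, _ => ""                 -- fuel exhausted: never reached when fuel ≥ max length
  | fuel + 1, c, u =>
    let n := max c.length u.length
    if n = 0 then ""
    else if n = 1 then
      if c = [] then
        String.ofList ("<span class=\"letter-extra\">".toList ++ u ++ "</span>".toList)
      else if u = [] then
        String.ofList ("<span class=\"letter-missing\">".toList ++ c ++ "</span>".toList)
      else
        String.ofList ("<span class=\"".toList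
          ++ (if c = u then "letter-correct" else "letter-incorrect").toList
          ++ "\">".toList ++ c ++ "</span>".toList)
    else
      let m := n / 2
      pvAltGo fuel (c.take m) (u.take m) ++ pvAltGo fuel (c.drop m) (u.drop m)

def generate_html_word_py_alt (correct : String) (user : String) : String :=
  pvAltGo (max correct.toList.length user.toList.length) correct.toList user.toList

-- ===== PRECONDITION & SPEC =====
def Spec_generate_html_word_py (correct : String) (user : String) (out : String) : Prop := out = generate_html_word_py_alt correct user
instance (correct : String) (user : String) (out : String) : Decidable (Spec_generate_html_word_py correct user out) := by unfold Spec_generate_html_word_py; infer_instance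

-- ===== CLAIM (what is proved, stated in full; the proofs are below) =====
def Claim_equal_generate_html_word_py : Prop := ∀ (correct : String) (user : String), Dom_generate_html_word_py correct user → Spec_generate_html_word_py correct user (generate_html_word_py correct user)

-- ===== LEMMAS AND PROOFS =====

-- reference shape: the merged per-position span list
def pvMerge : List Char → List Char → List String
  | [], us => us.map (fun y => pvCreateSpan y (pvDetClass [] [y]))
  | x :: xs, [] => pvCreateSpan x (pvDetClass [x] []) :: pvMerge xs []
  | x :: xs, y :: ys => pvCreateSpan x (pvDetClass [x] [y]) :: pvMerge xs ys

theorem pvALoop3_eq (u : List Char) : pvALoop3 u = pvMerge [] u := by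
  induction u with
  | nil => rfl
  | cons y ys ih => simp [pvALoop3, pvMerge, ih]

theorem pvALoop2_eq (c : List Char) : pvALoop2 c = pvMerge c [] := by
  induction c with
  | nil => rfl
  | cons x xs ih => simp [pvALoop2, pvMerge, ih]

theorem pvA_eq (c u : List Char) :
    (pvALoop1 c u).1 ++ pvALoop2 (pvALoop1 c u).2.1 ++ pvALoop3 (pvALoop1 c u).2.2 = pvMerge c u := by
  induction c generalizing u with
  | nil => simpa [pvALoop1, pvALoop2] using pvALoop3_eq u
  | cons x xs ih =>
      cases u with
      | nil => simpa [pvALoop1, pvALoop3] using pvALoop2_eq (x :: xs)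
      | cons y ys => simp [pvALoop1, pvMerge, ih]

theorem pvFoldl_append (a : String) (l : List String) :
    List.foldl (fun r s => r ++ s) a l = a ++ List.foldl (fun r s => r ++ s) "" l := by
  induction l generalizing a with
  | nil => simp
  | cons b bs ih =>
      simp only [List.foldl]
      rw [ih (a ++ b), ih ("" ++ b), String.append_assoc]
      simp

theorem pvJoin_cons (a : String) (l : List String) : String.join (a :: l) = a ++ String.join l := by
  simp only [String.join, List.foldl]
  rw [pvFoldl_append]
  simp

theorem pvJoin_append (a b : List String) : String.join (a ++ b) = String.join a ++ String.join b := by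
  induction a with
  | nil => simp [String.join]
  | cons x xs ih => rw [List.cons_append, pvJoin_cons, pvJoin_cons, ih, String.append_assoc]

-- pvMerge splits at any index: alignment is positional
theorem pvMerge_split (m : Nat) (c u : List Char) :
    pvMerge c u = pvMerge (c.take m) (u.take m) ++ pvMerge (c.drop m) (u.drop m) := by
  induction m generalizing c u with
  | zero => simp [pvMerge]
  | succ k ih =>
      match c, u with
      | [], [] => simp [pvMerge]
      | [], y :: ys =>
          simp only [List.take_nil, List.drop_nil, List.take_succ_cons, List.drop_succ_cons]
          simp only [pvMerge, List.map_cons, List.cons_append, List.cons.injEq, true_and]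
          rw [List.map_take, List.map_drop, List.take_append_drop]
      | x :: xs, [] =>
          simp only [List.take_nil, List.drop_nil, List.take_succ_cons, List.drop_succ_cons]
          have := ih xs []
          simp only [List.take_nil, List.drop_nil] at this
          simp [pvMerge, this]
      | x :: xs, y :: ys =>
          simp only [List.take_succ_cons, List.drop_succ_cons]
          simp [pvMerge, ih xs ys]

theorem pvB_eq_fuel (fuel : Nat) (c u : List Char) (h : max c.length u.length ≤ fuel) :
    pvAltGo fuel c u = String.join (pvMerge c u) := by
  induction fuel generalizing c u with
  | zero =>
      obtain rfl : c = [] := List.length_eq_zero_iff.mp (by omega)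
      obtain rfl : u = [] := List.length_eq_zero_iff.mp (by omega)
      simp [pvAltGo, pvMerge, String.join]
  | succ k ih =>
      rw [pvAltGo]
      by_cases h0 : max c.length u.length = 0
      · rw [if_pos h0]
        obtain rfl : c = [] := List.length_eq_zero_iff.mp (by omega)
        obtain rfl : u = [] := List.length_eq_zero_iff.mp (by omega)
        simp [pvMerge, String.join]
      · rw [if_neg h0]
        by_cases h1 : max c.length u.length = 1
        · rw [if_pos h1]
          by_cases hc : c = []
          · rw [if_pos hc]
            subst hc
            obtain ⟨y, rfl⟩ := List.length_eq_one_iff.mp (show u.length = 1 by simp at h1; omega)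
            simp [pvMerge, pvCreateSpan, pvDetClass, String.join]
          · rw [if_neg hc]
            by_cases hu : u = []
            · rw [if_pos hu]
              subst hu
              obtain ⟨x, rfl⟩ := List.length_eq_one_iff.mp (show c.length = 1 by simp at h1; omega)
              simp [pvMerge, pvCreateSpan, pvDetClass, String.join]
            · rw [if_neg hu]
              have hcl : c.length = 1 := by
                have : c.length ≠ 0 := fun hh => hc (List.length_eq_zero_iff.mp hh)
                omega
              have hul : u.length = 1 := by
                have : u.length ≠ 0 := fun hh => hu (List.length_eq_zero_iff.mp hh)
                omega
              obtain ⟨x, rfl⟩ := List.length_eq_one_iff.mp hcl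
              obtain ⟨y, rfl⟩ := List.length_eq_one_iff.mp hul
              by_cases hxy : x = y
              · subst hxy
                simp [pvMerge, pvCreateSpan, pvDetClass, String.join]
              · simp [pvMerge, pvCreateSpan, pvDetClass, String.join, hxy]
        · rw [if_neg h1]
          change pvAltGo k (c.take (max c.length u.length / 2)) (u.take (max c.length u.length / 2))
              ++ pvAltGo k (c.drop (max c.length u.length / 2)) (u.drop (max c.length u.length / 2))
              = String.join (pvMerge c u)
          rw [ih _ _ (by simp only [List.length_take]; omega),
              ih _ _ (by simp only [List.length_drop]; omega),
              ← pvJoin_append, ← pvMerge_split]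

-- ===== VERDICT (by name: the statement is the Claim_ definition above) =====
theorem generate_html_word_py_spec : Claim_equal_generate_html_word_py := by
  intro correct user _
  unfold Spec_generate_html_word_py
  rw [generate_html_word_py, generate_html_word_py_alt,
      pvB_eq_fuel _ _ _ (le_refl _), pvA_eq]
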